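-- pv_equiv track=rewrite | github.com/gregoryann/Python-Beginner-Examples | Advent-of-Code/2019/day4/day4.py | has_pair_not_more
-- ===== SOURCE A (Python) =====
-- def has_pair_not_more(L):
--     for i in range(1, len(L)):
--         result = 0 # accumulates the decision
--         if L[i] == L[i - 1]:
--             # we have a pair
--             if i - 2 >= 0 and L[i - 2] != L[i]:
--                 # check the previous element before pair
--                 result += 1
--             if i + 1 < len(L) and L[i + 1] != L[i]:
--                 # check the next element after pair
--                 result += 1
--             if i - 2 < 0:
--                 # it's at the beginning
--                 result += 1
--             if i + 1 >= len(L):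
--                 # it's at the end
--                 result += 1
--             if result == 2:
--                 return True
--     return False
-- ===== SOURCE B (Python) =====
-- def has_pair_not_more(L):
--     run = 0
--     prev = 0
--     for x in L:
--         if run and x == prev:
--             run += 1
--         else:
--             if run == 2:
--                 return True
--             run = 1
--             prev = x
--     return run == 2
-- ===== Notes on version B (the rewrite author's own statement) =====
-- stated objective: simpler
-- what changed: B replaces A's per-index neighbour inspection (looking at L[i-2] and L[i+1] around each adjacent pair and tallying a 4-way indicator sum) with a single run-length scan that maintains the current value and run count and succeeds when a maximal run ends with length exactly 2.
import Mathlib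
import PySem

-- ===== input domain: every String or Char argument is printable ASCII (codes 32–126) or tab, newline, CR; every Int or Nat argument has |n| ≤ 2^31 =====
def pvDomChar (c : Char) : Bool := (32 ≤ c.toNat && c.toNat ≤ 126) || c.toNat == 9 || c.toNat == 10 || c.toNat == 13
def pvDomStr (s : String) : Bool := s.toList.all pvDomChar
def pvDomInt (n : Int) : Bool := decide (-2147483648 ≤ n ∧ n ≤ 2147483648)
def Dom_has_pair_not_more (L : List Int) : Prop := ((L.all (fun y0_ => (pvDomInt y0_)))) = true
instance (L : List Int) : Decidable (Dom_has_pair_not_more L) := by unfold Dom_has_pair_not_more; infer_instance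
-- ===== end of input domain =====

-- B replaces A's per-index neighbour inspection with a single run-length scan (simpler decomposition, same O(n) cost).

-- ===== PORT A =====
-- literal port of A's index loop `for i in range(1, len(L))` with early return
def hpnA_go (L : List Int) (i : Nat) : Bool :=
  if _h : i < L.length then
    if L.getD i 0 == L.getD (i - 1) 0 then
      let result : Nat :=
        (if 2 ≤ i ∧ L.getD (i - 2) 0 ≠ L.getD i 0 then 1 else 0) +
        (if i + 1 < L.length ∧ L.getD (i + 1) 0 ≠ L.getD i 0 then 1 else 0) +
        (if i < 2 then 1 else 0) +
        (if L.length ≤ i + 1 then 1 else 0)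
      if result == 2 then true else hpnA_go L (i + 1)
    else hpnA_go L (i + 1)
  else false
termination_by L.length - i

def has_pair_not_more (L : List Int) : Bool := hpnA_go L 1

-- ===== PORT B =====
-- literal port of B's run-length scan (state: current run length, current value)
def hpnB_loop (L : List Int) (run : Nat) (prev : Int) : Bool :=
  match L with
  | [] => run == 2
  | x :: xs =>
    if run ≠ 0 ∧ x == prev then hpnB_loop xs (run + 1) prev
    else if run == 2 then true else hpnB_loop xs 1 x

def has_pair_not_more_alt (L : List Int) : Bool := hpnB_loop L 0 0

-- ===== PRECONDITION & SPEC =====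
def Spec_has_pair_not_more (L : List Int) (out : Bool) : Prop := out = has_pair_not_more_alt L
instance (L : List Int) (out : Bool) : Decidable (Spec_has_pair_not_more L out) := by unfold Spec_has_pair_not_more; infer_instance

-- ===== CLAIM (what is proved, stated in full; the proofs are below) =====
def Claim_equal_has_pair_not_more : Prop := ∀ (L : List Int), Dom_has_pair_not_more L → Spec_has_pair_not_more L (has_pair_not_more L)

-- ===== LEMMAS AND PROOFS =====

-- structural reformulation of A's loop: the only context it carries is the element two back
def hpnG (prev2 : Option Int) : List Int → Bool
  | x :: y :: rest =>
    if y == x then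
      if (prev2 ≠ some y) ∧ (rest.head? ≠ some y) then true
      else hpnG (some x) (y :: rest)
    else hpnG (some x) (y :: rest)
  | _ => false

theorem hpnG_short (p : Option Int) (l : List Int) (h : l.length ≤ 1) : hpnG p l = false := by
  match l with
  | [] => rfl
  | [x] => rfl
  | x :: y :: r => simp at h

theorem hpnA_bridge_aux (n : Nat) : ∀ (L : List Int) (i : Nat), L.length - i ≤ n → 1 ≤ i →
    hpnA_go L i = hpnG (if 2 ≤ i then some (L.getD (i - 2) 0) else none) (L.drop (i - 1)) := by
  induction n with
  | zero =>
    intro L i hn hi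
    rw [hpnA_go, dif_neg (by omega), hpnG_short]
    simp; omega
  | succ n ih =>
    intro L i hn hi
    by_cases hlt : i < L.length
    · have h1 : i - 1 < L.length := by omega
      have hdrop : L.drop (i - 1) = L[i-1] :: L[i] :: L.drop (i + 1) := by
        rw [List.drop_eq_getElem_cons h1, show i - 1 + 1 = i by omega,
          List.drop_eq_getElem_cons hlt]
      have hgi : L.getD i 0 = L[i] := List.getD_eq_getElem L 0 hlt
      have hgi1 : L.getD (i - 1) 0 = L[i-1] := List.getD_eq_getElem L 0 h1
      rw [hpnA_go, dif_pos hlt, hdrop]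
      simp only [hpnG, hgi, hgi1]
      by_cases hpair : (L[i] == L[i-1]) = true
      · rw [if_pos hpair, if_pos hpair]
        have hcond : (((if 2 ≤ i then some (L.getD (i - 2) 0) else none) ≠ some (L[i])) ∧
            ((L.drop (i + 1)).head? ≠ some L[i])) ↔
            ((if 2 ≤ i ∧ L.getD (i - 2) 0 ≠ L[i] then 1 else 0) +
            (if i + 1 < L.length ∧ L.getD (i + 1) 0 ≠ L[i] then 1 else 0) +
            (if i < 2 then 1 else 0) +
            (if L.length ≤ i + 1 then (1:Nat) else 0)) = 2 := by
          rw [List.head?_drop]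
          by_cases h2i : 2 ≤ i <;> by_cases hend : i + 1 < L.length
          · have h3 : L[i+1]? = some L[i+1] := List.getElem?_eq_getElem hend
            have h4 : L.getD (i+1) 0 = L[i+1] := List.getD_eq_getElem L 0 hend
            simp only [h3, h4, h2i, hend, true_and, if_neg (show ¬ i < 2 by omega),
              if_neg (show ¬ L.length ≤ i + 1 by omega)]
            split_ifs <;> simp_all
          · have h3 : L[i+1]? = none := List.getElem?_eq_none (by omega)
            simp only [h3, h2i, true_and, if_neg (show ¬ i < 2 by omega),
              if_pos (show L.length ≤ i + 1 by omega),
              if_neg (show ¬ (i + 1 < L.length ∧ L.getD (i + 1) 0 ≠ L[i]) from fun h => hend h.1)]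
            split_ifs <;> simp_all
          · have h3 : L[i+1]? = some L[i+1] := List.getElem?_eq_getElem hend
            have h4 : L.getD (i+1) 0 = L[i+1] := List.getD_eq_getElem L 0 hend
            simp only [h3, h4, hend, true_and, if_pos (show i < 2 by omega),
              if_neg (show ¬ L.length ≤ i + 1 by omega), if_neg h2i,
              if_neg (show ¬ (2 ≤ i ∧ L.getD (i - 2) 0 ≠ L[i]) from fun h => h2i h.1)]
            split_ifs <;> simp_all
          · have h3 : L[i+1]? = none := List.getElem?_eq_none (by omega)
            simp only [h3, if_pos (show i < 2 by omega), if_neg h2i,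
              if_pos (show L.length ≤ i + 1 by omega),
              if_neg (show ¬ (2 ≤ i ∧ L.getD (i - 2) 0 ≠ L[i]) from fun h => h2i h.1),
              if_neg (show ¬ (i + 1 < L.length ∧ L.getD (i + 1) 0 ≠ L[i]) from fun h => hend h.1)]
            simp
        by_cases hs : ((if 2 ≤ i ∧ L.getD (i - 2) 0 ≠ L[i] then 1 else 0) +
            (if i + 1 < L.length ∧ L.getD (i + 1) 0 ≠ L[i] then 1 else 0) +
            (if i < 2 then 1 else 0) +
            (if L.length ≤ i + 1 then (1:Nat) else 0)) = 2
        · rw [if_pos (by simpa using hs), if_pos (hcond.mpr hs)]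
        · rw [if_neg (by simpa using hs), if_neg (fun h => hs (hcond.mp h))]
          rw [ih L (i+1) (by omega) (by omega), show i + 1 - 1 = i by omega,
            show i + 1 - 2 = i - 1 by omega, List.drop_eq_getElem_cons hlt, if_pos (by omega), hgi1]
      · rw [if_neg hpair, if_neg hpair]
        rw [ih L (i+1) (by omega) (by omega), show i + 1 - 1 = i by omega,
          show i + 1 - 2 = i - 1 by omega, List.drop_eq_getElem_cons hlt, if_pos (by omega), hgi1]
    · rw [hpnA_go, dif_neg hlt, hpnG_short]
      simp; omega


theorem hpnA_bridge (L : List Int) (i : Nat) (hi : 1 ≤ i) :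
    hpnA_go L i = hpnG (if 2 ≤ i then some (L.getD (i - 2) 0) else none) (L.drop (i - 1)) :=
  hpnA_bridge_aux (L.length - i) L i le_rfl hi

theorem hpnB_ge3 (t : List Int) : ∀ (a : Int) (n m : Nat), 3 ≤ n → 3 ≤ m →
    hpnB_loop t n a = hpnB_loop t m a := by
  induction t with
  | nil => intro a n m hn hm; simp [hpnB_loop]; omega
  | cons x xs ih =>
    intro a n m hn hm
    simp only [hpnB_loop]
    by_cases hx : x = a
    · rw [if_pos (show n ≠ 0 ∧ (x == a) = true by simp [hx]; omega),
        if_pos (show m ≠ 0 ∧ (x == a) = true by simp [hx]; omega)]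
      exact ih a (n+1) (m+1) (by omega) (by omega)
    · rw [if_neg (show ¬(n ≠ 0 ∧ (x == a) = true) by simp [hx]),
        if_neg (show ¬(m ≠ 0 ∧ (x == a) = true) by simp [hx]),
        if_neg (show ¬((n == 2) = true) by simp; omega),
        if_neg (show ¬((m == 2) = true) by simp; omega)]

theorem hpnGB (t : List Int) :
    (∀ a prev2, prev2 ≠ some a → hpnB_loop t 1 a = hpnG prev2 (a :: t)) ∧
    (∀ (a : Int) (n : Nat), 3 ≤ n → hpnB_loop t n a = hpnG (some a) (a :: t)) := by
  induction t with
  | nil =>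
    refine ⟨fun a prev2 _ => by simp [hpnB_loop, hpnG], fun a n hn => ?_⟩
    simp [hpnB_loop, hpnG]; omega
  | cons b s ih =>
    obtain ⟨ih1, ih2⟩ := ih
    constructor
    · intro a prev2 hp
      by_cases hba : b = a
      · subst hba
        -- the scanned element equals the previous one: A sees a pair here
        simp only [hpnG]
        rw [if_pos (by simp)]
        by_cases hs : s.head? = some b
        · obtain ⟨s2, rfl⟩ : ∃ s2, s = b :: s2 := by
            cases s with
            | nil => simp at hs
            | cons c s2 => exact ⟨s2, by simpa using (by simpa using hs : c = b) ▸ rfl⟩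
          rw [if_neg (by simp [hs])]
          rw [← ih2 b 3 le_rfl]
          simp only [hpnB_loop]
          rw [if_pos (show (1:Nat) ≠ 0 ∧ (b == b) = true by simp),
              if_pos (show (1:Nat)+1 ≠ 0 ∧ (b == b) = true by simp),
              if_pos (show (3:Nat) ≠ 0 ∧ (b == b) = true by simp)]
          exact hpnB_ge3 s2 b (1+1+1) (3+1) (by omega) (by omega)
        · rw [if_pos ⟨hp, by simp [hs]⟩]
          cases s with
          | nil => simp [hpnB_loop]
          | cons c s2 =>
            have hcb : ¬ c = b := fun h => hs (by simp [h])
            simp only [hpnB_loop]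
            rw [if_pos (by simp), if_neg (by simp [hcb]), if_pos (by simp)]
      · simp only [hpnB_loop, hpnG]
        rw [if_neg (by simp [hba]), if_neg (by simp), if_neg (by simp [hba])]
        exact ih1 b (some a) (by simp [Ne.symm hba])
    · intro a n hn
      by_cases hba : b = a
      · subst hba
        simp only [hpnB_loop, hpnG]
        rw [if_pos (by simp; omega), if_pos (by simp), if_neg (by simp)]
        exact ih2 b (n+1) (by omega)
      · simp only [hpnB_loop, hpnG]
        rw [if_neg (by simp [hba]), if_neg (by simp; omega), if_neg (by simp [hba])]
        exact ih1 b (some a) (by simp [Ne.symm hba])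


-- ===== VERDICT (by name: the statement is the Claim_ definition above) =====
theorem has_pair_not_more_spec : Claim_equal_has_pair_not_more := by
  intro L _
  unfold Spec_has_pair_not_more has_pair_not_more has_pair_not_more_alt
  rw [hpnA_bridge L 1 le_rfl]
  simp only [show ¬ (2 ≤ 1) by omega, List.drop]
  match L with
  | [] => rfl
  | x :: xs =>
    have h2 := (hpnGB xs).1 x none (by simp)
    simp [hpnB_loop, ← h2]
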